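-- pv_equiv track=rewrite | github.com/pizard/Algorithm | Python/Programmers/Kakao/2019_Winter_Intern/Q5_SteppingStones_Binary.py | steppingStones
-- ===== SOURCE A (Python) =====
-- def steppingStones(stones, Num, k) -> bool: # stones : 돌, Num : 인원, k : 최대 칸 수
--     emptyLen = 0
--     for stone in stones:
--         if stone < Num:
--             emptyLen += 1
--         else:
--             if emptyLen >= k:
--                 return False
--             emptyLen = 0
--     if emptyLen >= k:
--         return False
--     return True
-- ===== SOURCE B (Python) =====
-- def steppingStones(stones, Num, k) -> bool:
--     # boundaries = indices of stones that survive, with sentinels -1 and len(stones);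
--     # every maximal empty run is the gap between two consecutive boundaries.
--     bounds = [-1] + [i for i, s in enumerate(stones) if s >= Num] + [len(stones)]
--     longest = max(b - a - 1 for a, b in zip(bounds, bounds[1:]))
--     return longest < k
-- ===== Notes on version B (the rewrite author's own statement) =====
-- stated objective: alternative
-- what changed: Instead of A's early-exit accumulator loop with per-boundary threshold checks, B collects the indices of surviving stones (with -1 and len sentinels), computes every empty-run length as the gap between consecutive boundary indices, and does a single max-then-compare against k.
import Mathlib
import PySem

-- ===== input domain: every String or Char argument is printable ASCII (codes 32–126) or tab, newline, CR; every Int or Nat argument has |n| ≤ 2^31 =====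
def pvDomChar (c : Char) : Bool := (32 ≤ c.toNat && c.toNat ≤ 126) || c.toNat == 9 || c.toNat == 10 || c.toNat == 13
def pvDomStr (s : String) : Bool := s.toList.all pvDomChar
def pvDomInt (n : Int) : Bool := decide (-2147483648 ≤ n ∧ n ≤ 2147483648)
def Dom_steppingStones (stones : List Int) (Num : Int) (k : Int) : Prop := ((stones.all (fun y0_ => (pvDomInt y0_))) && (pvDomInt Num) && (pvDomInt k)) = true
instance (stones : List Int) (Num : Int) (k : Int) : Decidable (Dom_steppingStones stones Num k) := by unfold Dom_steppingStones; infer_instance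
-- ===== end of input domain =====

-- B replaces A's early-exit accumulator loop by a boundary-index/gap computation with one final max-then-compare; equal results, same O(n) cost.


-- ===== PORT A =====
-- A's for-loop with the early returns, as structural recursion on stones with the accumulator emptyLen
def steppingStonesLoop (Num k : Int) : List Int → Int → Bool
  | [], emptyLen => if emptyLen ≥ k then false else true
  | stone :: rest, emptyLen =>
    if stone < Num then steppingStonesLoop Num k rest (emptyLen + 1)
    else if emptyLen ≥ k then false
    else steppingStonesLoop Num k rest 0

def steppingStones (stones : List Int) (Num : Int) (k : Int) : Bool :=
  steppingStonesLoop Num k stones 0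

-- ===== PORT B =====
def steppingStones_alt (stones : List Int) (Num : Int) (k : Int) : Bool :=
  let bounds : List Int :=
    -1 :: (((PySem.List.enumerate stones 0).filter (fun p => decide (Num ≤ p.2))).map (·.1)
      ++ [(stones.length : Int)])
  let gaps := (bounds.zip bounds.tail).map (fun p => p.2 - p.1 - 1)
  match PySem.List.max? gaps (fun y => y) with
  | some m => decide (m < k)
  | none => false   -- unreachable: bounds always has at least two elements

-- ===== PRECONDITION & SPEC =====
def Spec_steppingStones (stones : List Int) (Num : Int) (k : Int) (out : Bool) : Prop := out = steppingStones_alt stones Num k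
instance (stones : List Int) (Num : Int) (k : Int) (out : Bool) : Decidable (Spec_steppingStones stones Num k out) := by unfold Spec_steppingStones; infer_instance

-- ===== CLAIM (what is proved, stated in full; the proofs are below) =====
def Claim_equal_steppingStones : Prop := ∀ (stones : List Int) (Num : Int) (k : Int), Dom_steppingStones stones Num k → Spec_steppingStones stones Num k (steppingStones stones Num k)

-- ===== LEMMAS AND PROOFS =====

-- the (head, tail) of the list of maximal empty-run lengths of stones (head = first run, may be 0)
def pvRuns (Num : Int) : List Int → Int × List Int
  | [] => (0, [])
  | s :: rest =>
    let p := pvRuns Num rest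
    if s < Num then (p.1 + 1, p.2) else (0, p.1 :: p.2)

theorem pvFoldlMax (t : List Int) : ∀ a b : Int, t.foldl max (max a b) = max a (t.foldl max b) := by
  induction t with
  | nil => intro a b; simp
  | cons x t ih =>
    intro a b
    simp only [List.foldl_cons, max_assoc]
    exact ih a (max b x)

-- A's loop decides "the running max of (emptyLen + first run) and the later runs is < k"
theorem pvLoopA (Num k : Int) (l : List Int) : ∀ e : Int,
    steppingStonesLoop Num k l e =
      decide ((pvRuns Num l).2.foldl max (e + (pvRuns Num l).1) < k) := by
  induction l with
  | nil =>
    intro e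
    simp only [steppingStonesLoop, pvRuns, add_zero, List.foldl_nil]
    by_cases h : e ≥ k <;> simp [h] <;> omega
  | cons s rest ih =>
    intro e
    by_cases hs : s < Num
    · rw [show steppingStonesLoop Num k (s :: rest) e = steppingStonesLoop Num k rest (e + 1) from by
        simp [steppingStonesLoop, hs]]
      rw [ih (e + 1),
        show pvRuns Num (s :: rest) = ((pvRuns Num rest).1 + 1, (pvRuns Num rest).2) from by
          simp [pvRuns, hs]]
      ring_nf
    · rw [show steppingStonesLoop Num k (s :: rest) e
          = if e ≥ k then false else steppingStonesLoop Num k rest 0 from by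
        simp [steppingStonesLoop, hs]]
      rw [show pvRuns Num (s :: rest) = (0, (pvRuns Num rest).1 :: (pvRuns Num rest).2) from by
        simp [pvRuns, hs]]
      simp only [List.foldl_cons, add_zero]
      rw [pvFoldlMax, ih 0, zero_add]
      by_cases hk : e ≥ k
      · rw [if_pos hk]
        have hnot : ¬ max e ((pvRuns Num rest).2.foldl max (pvRuns Num rest).1) < k :=
          not_lt.mpr (le_trans hk (le_max_left _ _))
        simp [hnot]
      · have hk' : e < k := by omega
        rw [if_neg hk]
        by_cases h2 : (pvRuns Num rest).2.foldl max (pvRuns Num rest).1 < k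
        · have h3 : max e ((pvRuns Num rest).2.foldl max (pvRuns Num rest).1) < k := max_lt hk' h2
          simp [h2, h3]
        · have h3 : ¬ max e ((pvRuns Num rest).2.foldl max (pvRuns Num rest).1) < k :=
            fun h => h2 (lt_of_le_of_lt (le_max_right _ _) h)
          simp [h2, h3]

-- B's gap list over an enumeration starting at index c, with previous boundary prev
theorem pvGaps (Num : Int) (l : List Int) : ∀ c prev : Int,
    (((prev :: ((((PySem.List.enumerate l c).filter (fun p => decide (Num ≤ p.2))).map (·.1))
        ++ [c + l.length])).zip
      ((((PySem.List.enumerate l c).filter (fun p => decide (Num ≤ p.2))).map (·.1))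
        ++ [c + l.length])).map (fun p => p.2 - p.1 - 1))
    = (c - prev - 1 + (pvRuns Num l).1) :: (pvRuns Num l).2 := by
  induction l with
  | nil =>
    intro c prev
    simp [PySem.List.enumerate, pvRuns]
  | cons s rest ih =>
    intro c prev
    rw [PySem.List.enumerate_cons]
    have hlast : (c : Int) + ((s :: rest).length : Int) = (c + 1) + (rest.length : Int) := by
      simp [List.length_cons]; ring
    rw [hlast]
    by_cases hs : Num ≤ s
    · have hns : ¬ s < Num := by omega
      simp only [List.filter_cons, decide_eq_true_eq, if_pos hs, List.map_cons,
        List.cons_append, List.zip_cons_cons, List.map_cons]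
      rw [ih (c + 1) c,
        show pvRuns Num (s :: rest) = (0, (pvRuns Num rest).1 :: (pvRuns Num rest).2) from by
          simp [pvRuns, hns]]
      show _ :: (c + 1 - c - 1 + (pvRuns Num rest).1) :: _ = _ :: (pvRuns Num rest).1 :: _
      have h1 : (c : Int) + 1 - c - 1 + (pvRuns Num rest).1 = (pvRuns Num rest).1 := by ring
      have h2 : (c : Int) - prev - 1 = c - prev - 1 + (0 : Int) := by ring
      rw [h1]
      exact congrArg (fun z => z :: (pvRuns Num rest).1 :: (pvRuns Num rest).2) h2
    · have hps : s < Num := by omega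
      simp only [List.filter_cons, decide_eq_true_eq, if_neg hs]
      rw [ih (c + 1) prev,
        show pvRuns Num (s :: rest) = ((pvRuns Num rest).1 + 1, (pvRuns Num rest).2) from by
          simp [pvRuns, hps]]
      show (c + 1 - prev - 1 + (pvRuns Num rest).1) :: _ = (c - prev - 1 + ((pvRuns Num rest).1 + 1)) :: _
      have h1 : (c : Int) + 1 - prev - 1 + (pvRuns Num rest).1 = c - prev - 1 + ((pvRuns Num rest).1 + 1) := by ring
      rw [h1]

-- ===== VERDICT (by name: the statement is the Claim_ definition above) =====
theorem steppingStones_spec : Claim_equal_steppingStones := by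
  intro stones Num k _
  unfold Spec_steppingStones steppingStones steppingStones_alt
  rw [pvLoopA]
  have hg := pvGaps Num stones 0 (-1)
  rw [zero_add] at hg
  simp only [List.tail_cons]
  rw [hg, PySem.List.max?_id_cons]
  norm_num
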